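-- pv_equiv track=rewrite | github.com/Java4all/jenkins-failure-agent | src/iterative_analyzer.py | _fetch_more_log
-- ===== SOURCE A (Python) =====
-- from typing import List, Optional, Dict, Any, Tuple
--
-- def _fetch_more_log(target: str, log: str) -> Optional[str]:
--     """Fetch more log context around a specific pattern."""
--     lines = log.split('\n')
--
--     # Find lines matching target
--     for i, line in enumerate(lines):
--         if target.lower() in line.lower():
--             # Return 20 lines around it
--             start = max(0, i - 10)
--             end = min(len(lines), i + 10)
--             return '\n'.join(lines[start:end])
--
--     return None
-- ===== SOURCE B (Python) =====
-- def _fetch_more_log(target, log):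
--     """Fetch more log context around a specific pattern (find-based)."""
--     needle = target.lower()
--     if '\n' in needle:
--         return None  # a per-line match can never contain a newline
--     low = log.lower()
--     offset = low.find(needle)
--     if offset == -1:
--         return None
--     i = low[:offset].count('\n')
--     lines = log.split('\n')
--     start = max(0, i - 10)
--     end = min(len(lines), i + 10)
--     return '\n'.join(lines[start:end])
-- ===== Notes on version B (the rewrite author's own statement) =====
-- stated objective: alternative
-- what changed: Instead of lowercasing and substring-testing every line in a Python-level loop, B lowercases the whole log once, locates the first occurrence with a single str.find, converts the character offset to a line index by counting newlines in the prefix, and only then splits and joins the context window (a target containing a newline can never match a line, so B returns None for it up front).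
import Mathlib
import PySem

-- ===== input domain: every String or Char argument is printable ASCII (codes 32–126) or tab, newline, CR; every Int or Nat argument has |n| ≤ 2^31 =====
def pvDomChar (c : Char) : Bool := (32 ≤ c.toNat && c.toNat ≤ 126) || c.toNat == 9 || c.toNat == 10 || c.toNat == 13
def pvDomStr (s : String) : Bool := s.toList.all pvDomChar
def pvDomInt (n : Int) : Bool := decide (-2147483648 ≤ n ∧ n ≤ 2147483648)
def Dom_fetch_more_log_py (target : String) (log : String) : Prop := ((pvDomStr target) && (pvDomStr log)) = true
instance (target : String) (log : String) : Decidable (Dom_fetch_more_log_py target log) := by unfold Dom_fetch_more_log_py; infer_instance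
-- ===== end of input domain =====

-- B replaces A's per-line lower()+'in' loop by one whole-log lowercase + str.find, mapping the offset to a line index by counting newlines in the prefix (alternative algorithm, same cost).


-- ===== PORT A =====
-- the 'for i, line in enumerate(lines)' loop with early return
def fetchA_go (target : String) (all : List String) : List String → Int → Option String
  | [], _ => none
  | line :: rest, i =>
    if PySem.Str.isIn (PySem.Str.lower target) (PySem.Str.lower line) then
      some (PySem.Str.join "\n"
        (PySem.List.slice all (some (max 0 (i - 10))) (some (min ((all.length : Int)) (i + 10)))))
    else fetchA_go target all rest (i + 1)

def fetch_more_log_py (target : String) (log : String) : Option String :=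
  match PySem.Str.split? log "\n" with
  | none => none          -- unreachable: the separator "\n" is nonempty
  | some lines => fetchA_go target lines lines 0

-- ===== PORT B =====
def fetch_more_log_py_alt (target : String) (log : String) : Option String :=
  let needle := PySem.Str.lower target
  if PySem.Str.isIn "\n" needle then none
  else
    let low := PySem.Str.lower log
    let offset := PySem.Str.find low needle
    if offset = -1 then none
    else
      let i : Int := (PySem.Str.count (PySem.Str.slice low none (some offset)) "\n" : Int)
      match PySem.Str.split? log "\n" with
      | none => none      -- unreachable: the separator "\n" is nonempty
      | some lines =>
        some (PySem.Str.join "\n"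
          (PySem.List.slice lines (some (max 0 (i - 10))) (some (min ((lines.length : Int)) (i + 10)))))

-- ===== PRECONDITION & SPEC =====
def Spec_fetch_more_log_py (target : String) (log : String) (out : Option String) : Prop := out = fetch_more_log_py_alt target log
instance (target : String) (log : String) (out : Option String) : Decidable (Spec_fetch_more_log_py target log out) := by unfold Spec_fetch_more_log_py; infer_instance

-- ===== CLAIM (what is proved, stated in full; the proofs are below) =====
def Claim_equal_fetch_more_log_py : Prop := ∀ (target : String) (log : String), Dom_fetch_more_log_py target log → Spec_fetch_more_log_py target log (fetch_more_log_py target log)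

-- ===== LEMMAS AND PROOFS =====

theorem pvCount_go_singleton (c : Char) (l : List Char) (acc : Nat) :
    PySem.Chars.count.go [c] l.length l acc = acc + l.count c := by
  induction l generalizing acc with
  | nil => simp [PySem.Chars.count.go]
  | cons a rest ih =>
    rw [List.length_cons, PySem.Chars.count.go]
    by_cases h : a = c
    · subst h
      simp [List.isPrefixOf, ih]
      omega
    · simp [List.isPrefixOf, Ne.symm h, ih, h]

theorem pvCount_singleton (l : List Char) (c : Char) :
    PySem.Chars.count l [c] = l.count c := by
  simp [PySem.Chars.count, pvCount_go_singleton]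

theorem pvSplitOnP_ne_nil (p : Char → Bool) (cs : List Char) : cs.splitOnP p ≠ [] := by
  induction cs with
  | nil => simp [List.splitOnP_nil]
  | cons a rest ih =>
    rw [List.splitOnP_cons]
    split_ifs
    · simp
    · cases h : rest.splitOnP p with
      | nil => exact absurd h ih
      | cons x xs => simp

theorem pvSplitOn_go (c : Char) : ∀ (fuel : Nat) (l cur : List Char) (acc : List (List Char)),
    l.length < fuel →
    PySem.Chars.splitOn.go [c] fuel l cur acc
      = acc.reverse ++ (l.splitOn c).modifyHead (cur.reverse ++ ·) := by
  intro fuel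
  induction fuel with
  | zero => omega
  | succ n ih =>
    intro l cur acc hl
    cases l with
    | nil =>
      rw [PySem.Chars.splitOn.go]
      · simp [List.splitOn, List.splitOnP_nil]
      · omega
    | cons a rest =>
      rw [PySem.Chars.splitOn.go]
      simp only [List.length_cons] at hl
      by_cases h : a = c
      · subst h
        simp only [List.isPrefixOf, BEq.rfl, Bool.true_and, if_pos]
        rw [ih _ _ _ (by simpa using by omega)]
        simp only [List.splitOn, List.splitOnP_cons, BEq.rfl, if_pos, List.reverse_nil,
          List.nil_append, List.modifyHead_cons]
        cases hsp : rest.splitOnP (· == a) <;> simp [hsp]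
      · have hp : [c].isPrefixOf (a :: rest) = false := by
          simp [List.isPrefixOf]; intro hh; exact absurd hh.symm h
        rw [hp]
        simp only [Bool.false_eq_true, if_false]
        rw [ih _ _ _ (by omega)]
        simp only [List.splitOn, List.splitOnP_cons, beq_iff_eq, h, if_false]
        cases hsp : rest.splitOnP (· == c) with
        | nil => exact absurd hsp (pvSplitOnP_ne_nil _ _)
        | cons x xs => simp [List.modifyHead]

theorem pvSplitOn_char (cs : List Char) (c : Char) :
    PySem.Chars.splitOn cs [c] = cs.splitOn c := by
  rw [PySem.Chars.splitOn, pvSplitOn_go c (cs.length + 1) cs [] [] (by omega)]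
  cases h : cs.splitOn c with
  | nil => exact absurd h (by rw [List.splitOn] at h ⊢; exact pvSplitOnP_ne_nil _ _)
  | cons x xs => simp

theorem pvSplitOn_no_sep (c : Char) (cs : List Char) :
    ∀ l ∈ cs.splitOn c, c ∉ l := by
  induction cs with
  | nil => simp [List.splitOn, List.splitOnP_nil]
  | cons a rest ih =>
    rw [List.splitOn, List.splitOnP_cons] at *
    by_cases h : a = c
    · simp only [h, BEq.rfl, if_pos]
      intro l hl
      rcases List.mem_cons.1 hl with rfl | hl
      · simp
      · exact ih l hl
    · simp only [beq_iff_eq, h, if_false]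
      cases hsp : rest.splitOnP (· == c) with
      | nil => exact absurd hsp (pvSplitOnP_ne_nil _ _)
      | cons x xs =>
        rw [hsp] at ih
        intro l hl
        rcases List.mem_cons.1 hl with rfl | hl
        · intro hm
          rcases List.mem_cons.1 hm with rfl | hm
          · exact h rfl
          · exact ih x (List.mem_cons_self) hm
        · exact ih l (List.mem_cons_of_mem _ hl)

theorem pvSplitOn_of_not_mem (c : Char) (cs : List Char) (h : c ∉ cs) :
    cs.splitOn c = [cs] := by
  induction cs with
  | nil => simp [List.splitOn, List.splitOnP_nil]
  | cons a rest ih =>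
    rw [List.splitOn, List.splitOnP_cons]
    simp only [List.mem_cons, not_or] at h
    rw [List.splitOn] at ih
    rw [ih h.2]
    simp [beq_iff_eq, show ¬ a = c from fun hh => h.1 hh.symm]

theorem pvSplitOn_append (c : Char) (l₀ L' : List Char) (h : c ∉ l₀) :
    (l₀ ++ c :: L').splitOn c = l₀ :: L'.splitOn c := by
  induction l₀ with
  | nil => simp [List.splitOn, List.splitOnP_cons]
  | cons a rest ih =>
    simp only [List.mem_cons, not_or] at h
    rw [List.cons_append, List.splitOn, List.splitOnP_cons]
    simp only [beq_iff_eq, show ¬ a = c from fun hh => h.1 hh.symm, if_false]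
    rw [List.splitOn] at ih
    rw [ih h.2]
    simp

theorem pvFirstSep (c : Char) (L : List Char) (h : c ∈ L) :
    ∃ l₀ L', L = l₀ ++ c :: L' ∧ c ∉ l₀ := by
  induction L with
  | nil => simp at h
  | cons a rest ih =>
    by_cases ha : a = c
    · exact ⟨[], rest, by simp [ha], by simp⟩
    · rcases ih (by rcases List.mem_cons.1 h with h' | h'; exact absurd h'.symm ha; exact h') with
        ⟨l₀, L', rfl, hn⟩
      exact ⟨a :: l₀, L', by simp, by simp [hn]; exact fun hh => ha hh.symm⟩

theorem pvSingleton_infix (c : Char) (l : List Char) : [c] <:+: l ↔ c ∈ l := by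
  constructor
  · intro h; exact h.mem (by simp)
  · intro h
    rcases List.append_of_mem h with ⟨s, t, rfl⟩
    exact ⟨s, t, by simp⟩

theorem pvPrefix_before_sep (c : Char) (t xs ys : List Char) (hc : c ∉ t)
    (h : t <+: xs ++ c :: ys) : t <+: xs := by
  induction t generalizing xs with
  | nil => exact List.nil_prefix
  | cons b t' ih =>
    simp only [List.mem_cons, not_or] at hc
    cases xs with
    | nil =>
      rw [List.nil_append, List.cons_prefix_cons] at h
      exact absurd h.1.symm hc.1
    | cons a xs' =>
      rw [List.cons_append, List.cons_prefix_cons] at h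
      exact List.cons_prefix_cons.mpr ⟨h.1, ih _ hc.2 h.2⟩

theorem pvInfix_split (c : Char) (t xs ys : List Char) (hc : c ∉ t) :
    t <:+: xs ++ c :: ys ↔ t <:+: xs ∨ t <:+: ys := by
  constructor
  · intro h
    induction xs with
    | nil =>
      rw [List.nil_append, List.infix_cons_iff] at h
      rcases h with h | h
      · cases t with
        | nil => exact Or.inl (List.nil_infix)
        | cons b t' =>
          rw [List.cons_prefix_cons] at h
          exact absurd (h.1 ▸ List.mem_cons_self) hc
      · exact Or.inr h
    | cons a xs' ih =>
      rw [List.cons_append, List.infix_cons_iff] at h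
      rcases h with h | h
      · exact Or.inl (pvPrefix_before_sep c t (a :: xs') ys hc (by simpa using h)).isInfix
      · rcases ih h with h' | h'
        · exact Or.inl (h'.trans (List.suffix_cons _ _).isInfix)
        · exact Or.inr h'
  · intro h
    rcases h with h | h
    · exact h.trans (List.prefix_append _ _).isInfix
    · exact h.trans ((List.suffix_cons _ _).trans (List.suffix_append _ _)).isInfix

theorem pvFind_unique (L t : List Char) (p : Nat) (_hp : p ≤ L.length)
    (h1 : t <+: L.drop p) (h2 : ∀ i < p, ¬ t <+: L.drop i) :
    PySem.Chars.find L t = (p : Int) := by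
  have hinf : t <:+: L := h1.isInfix.trans (List.drop_suffix p L).isInfix
  have hne : PySem.Chars.find L t ≠ -1 := (PySem.Chars.find_ne_neg_one_iff L t).mpr hinf
  have hge : 0 ≤ PySem.Chars.find L t := by
    have := PySem.Chars.neg_one_le_find L t
    omega
  obtain ⟨hsp, hmin⟩ := PySem.Chars.find_spec hge
  set q := (PySem.Chars.find L t).toNat with hq
  have : q = p := by
    rcases lt_trichotomy q p with h | h | h
    · exact absurd hsp (h2 q h)
    · exact h
    · exact absurd h1 (hmin p h)
  omega

theorem pvToNat_ofNat (n : Nat) (h : n.isValidChar) : (Char.ofNat n).toNat = n := by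
  rw [Char.ofNat, dif_pos h]
  simp [Char.ofNatAux, Char.toNat]

theorem pvLowerChar_newline (a : Char) : PySem.Chars.lowerChar a = '\n' ↔ a = '\n' := by
  unfold PySem.Chars.lowerChar PySem.Chars.isupper
  by_cases hu : ('A' ≤ a ∧ a ≤ 'Z')
  · have h65 : 65 ≤ a.toNat := Nat.succ_le_of_lt hu.1
    have h10 : ('\n').toNat = 10 := by decide
    rw [if_pos (by simp [hu.1, hu.2])]
    have h90 : a.toNat ≤ 90 := hu.2
    have hv : (a.toNat + 32).isValidChar := Or.inl (by omega)
    constructor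
    · intro h
      exfalso
      have h2 := congrArg Char.toNat h
      rw [pvToNat_ofNat _ hv, h10] at h2
      omega
    · intro h
      exfalso
      subst h
      rw [h10] at h65
      omega
  · rw [if_neg (by simpa using fun h1 h2 => hu ⟨h1, h2⟩)]

theorem pvSplitOn_map (f : Char → Char) (c : Char) (hf : ∀ a, f a = c ↔ a = c)
    (cs : List Char) : (cs.map f).splitOn c = (cs.splitOn c).map (List.map f) := by
  induction cs with
  | nil => simp [List.splitOn, List.splitOnP_nil]
  | cons a rest ih =>
    simp only [List.splitOn] at ih ⊢
    rw [List.map_cons, List.splitOnP_cons, List.splitOnP_cons]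
    by_cases h : a = c
    · subst h
      rw [if_pos (by simp [(hf a).mpr rfl]), ih]
      simp
    · have hfa : ¬ f a = c := fun hh => h ((hf a).mp hh)
      simp only [beq_iff_eq, hfa, h, if_false]
      rw [ih]
      cases hsp : rest.splitOnP (· == c) with
      | nil => exact absurd hsp (pvSplitOnP_ne_nil _ _)
      | cons x xs => simp

theorem pvCruxAux (t : List Char) (hnl : '\n' ∉ t) : ∀ (n : Nat) (L : List Char), L.length ≤ n →
    List.findIdx? (fun l => PySem.Chars.isIn t l) (L.splitOn '\n')
      = if t <:+: L then some ((L.take (PySem.Chars.find L t).toNat).count '\n') else none := by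
  intro n
  induction n with
  | zero =>
    intro L hL
    have : L = [] := List.eq_nil_of_length_eq_zero (by omega)
    subst this
    rw [pvSplitOn_of_not_mem '\n' [] (by simp), List.findIdx?_cons]
    by_cases ht : t = []
    · subst ht
      have h1 : PySem.Chars.isIn ([] : List Char) ([] : List Char) = true := by
        rw [PySem.Chars.isIn_iff_infix]
      rw [if_pos h1, if_pos List.nil_infix]
      simp
    · have hninf : ¬ t <:+: ([] : List Char) := fun hh => ht (List.eq_nil_of_infix_nil hh)
      rw [if_neg (by rw [Bool.not_eq_true, PySem.Chars.isIn_eq_false_iff]; exact hninf),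
        if_neg hninf]
      simp
  | succ n ih =>
    intro L hL
    by_cases hm : '\n' ∈ L
    · obtain ⟨l₀, L', rfl, hno⟩ := pvFirstSep '\n' L hm
      rw [pvSplitOn_append _ _ _ hno, List.findIdx?_cons]
      by_cases h0 : t <:+: l₀
      · rw [if_pos (by rw [PySem.Chars.isIn_iff_infix]; exact h0)]
        have hinf : t <:+: l₀ ++ '\n' :: L' := (pvInfix_split _ _ _ _ hnl).mpr (Or.inl h0)
        rw [if_pos hinf]
        -- the first occurrence lies inside l₀
        obtain ⟨s, e, hse⟩ := h0
        have hge : 0 ≤ PySem.Chars.find (l₀ ++ '\n' :: L') t := by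
          have := PySem.Chars.neg_one_le_find (l₀ ++ '\n' :: L') t
          have := (PySem.Chars.find_ne_neg_one_iff (l₀ ++ '\n' :: L') t).mpr hinf
          omega
        obtain ⟨hsp, hmin⟩ := PySem.Chars.find_spec hge
        set p := (PySem.Chars.find (l₀ ++ '\n' :: L') t).toNat with hp
        have hjs : t <+: (l₀ ++ '\n' :: L').drop s.length := by
          rw [← hse]
          rw [List.drop_append]
          simp
        have hple : p ≤ s.length := by
          by_contra hgt
          exact hmin s.length (by omega) hjs
        have hsl : s.length ≤ l₀.length := by
          have := congrArg List.length hse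
          simp at this
          omega
        rw [List.take_append_of_le_length (by omega)]
        have : (l₀.take p).count '\n' = 0 :=
          List.count_eq_zero.mpr (fun hmem => hno (List.mem_of_mem_take hmem))
        simp [this]
      · rw [if_neg (by rw [Bool.not_eq_true, PySem.Chars.isIn_eq_false_iff]; exact h0)]
        have hlen : L'.length ≤ n := by simp at hL; omega
        rw [ih L' hlen]
        by_cases hL' : t <:+: L'
        · rw [if_pos hL', if_pos ((pvInfix_split _ _ _ _ hnl).mpr (Or.inr hL'))]
          -- find on the whole = l₀.length + 1 + find on L'
          have hge' : 0 ≤ PySem.Chars.find L' t := by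
            have := PySem.Chars.neg_one_le_find L' t
            have := (PySem.Chars.find_ne_neg_one_iff L' t).mpr hL'
            omega
          obtain ⟨hsp', hmin'⟩ := PySem.Chars.find_spec hge'
          set q := (PySem.Chars.find L' t).toNat with hq
          have hqle : q ≤ L'.length := by
            have := PySem.Chars.find_le_length L' t
            omega
          have hfind : PySem.Chars.find (l₀ ++ '\n' :: L') t = ((l₀.length + 1 + q : Nat) : Int) := by
            apply pvFind_unique
            · simp; omega
            · rw [List.drop_append,
                List.drop_of_length_le (by omega),
                show l₀.length + 1 + q - l₀.length = 1 + q by omega,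
                show (1 + q) = q + 1 from Nat.add_comm 1 q]
              simp only [List.nil_append, List.drop_succ_cons]
              exact hsp'
            · intro i hi
              by_cases hil : i ≤ l₀.length
              · intro hpre
                rw [List.drop_append, Nat.sub_eq_zero_of_le hil] at hpre
                have := pvPrefix_before_sep '\n' t (l₀.drop i) L' hnl hpre
                exact h0 (this.isInfix.trans (List.drop_suffix i l₀).isInfix)
              · intro hpre
                rw [List.drop_append,
                  List.drop_of_length_le (by omega)] at hpre
                have hi' : i - l₀.length = (i - l₀.length - 1) + 1 := by omega
                rw [hi'] at hpre
                simp only [List.nil_append, List.drop_succ_cons] at hpre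
                exact hmin' (i - l₀.length - 1) (by omega) hpre
          rw [hfind, Int.toNat_natCast]
          rw [List.take_append,
            List.take_of_length_le (by omega : l₀.length ≤ l₀.length + 1 + q),
            show l₀.length + 1 + q - l₀.length = 1 + q by omega]
          have h1q : (1 + q) = q + 1 := by omega
          rw [h1q]
          simp only [List.take_succ_cons]
          rw [List.count_append, List.count_cons]
          have hc0 : l₀.count '\n' = 0 := List.count_eq_zero.mpr hno
          simp [hc0]
        · rw [if_neg hL', if_neg (by
            rw [pvInfix_split _ _ _ _ hnl]
            rintro (h | h)
            · exact h0 h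
            · exact hL' h)]
          simp
    · rw [pvSplitOn_of_not_mem _ _ hm, List.findIdx?_cons]
      by_cases h : t <:+: L
      · rw [if_pos (by rw [PySem.Chars.isIn_iff_infix]; exact h), if_pos h]
        have : ((L.take (PySem.Chars.find L t).toNat).count '\n') = 0 :=
          List.count_eq_zero.mpr (fun hmem => hm (List.mem_of_mem_take hmem))
        simp [this]
      · rw [if_neg (by rw [Bool.not_eq_true, PySem.Chars.isIn_eq_false_iff]; exact h), if_neg h]
        simp

theorem pvCrux (t : List Char) (hnl : '\n' ∉ t) (L : List Char) :
    List.findIdx? (fun l => PySem.Chars.isIn t l) (L.splitOn '\n')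
      = if t <:+: L then some ((L.take (PySem.Chars.find L t).toNat).count '\n') else none :=
  pvCruxAux t hnl L.length L le_rfl

-- A's loop returns according to findIdx?
theorem pvGoA_eq (target : String) (all : List String) : ∀ (rem : List String) (i : Int),
    fetchA_go target all rem i
      = (List.findIdx? (fun l => PySem.Str.isIn (PySem.Str.lower target) (PySem.Str.lower l)) rem).map
          (fun (k : Nat) => PySem.Str.join "\n"
            (PySem.List.slice all (some (max 0 (i + (k : Int) - 10)))
              (some (min ((all.length : Int)) (i + (k : Int) + 10))))) := by
  intro rem
  induction rem with
  | nil => intro i; simp [fetchA_go]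
  | cons line rest ih =>
    intro i
    rw [fetchA_go, List.findIdx?_cons]
    by_cases h : PySem.Str.isIn (PySem.Str.lower target) (PySem.Str.lower line) = true
    · rw [if_pos h, if_pos h]
      simp
    · rw [if_neg h, if_neg h, ih (i + 1)]
      cases hfi : List.findIdx? (fun l => PySem.Str.isIn (PySem.Str.lower target) (PySem.Str.lower l)) rest with
      | none => simp
      | some k =>
        simp only [Option.map_some]
        push_cast
        have e1 : i + 1 + (k : Int) - 10 = i + ((k : Int) + 1) - 10 := by ring
        have e2 : i + 1 + (k : Int) + 10 = i + ((k : Int) + 1) + 10 := by ring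
        rw [e1, e2]

-- the split of log, on both sides
theorem pvSplit_some (log : String) : ∃ lines : List String,
    PySem.Str.split? log "\n" = some lines ∧
    lines.map String.toList = log.toList.splitOn '\n' := by
  have h := PySem.Str.split?_map log "\n"
  have hsep : ("\n" : String).toList = ['\n'] := by decide
  rw [PySem.Chars.split?, hsep] at h
  simp only [List.isEmpty_cons, Bool.false_eq_true, if_false] at h
  cases hs : PySem.Str.split? log "\n" with
  | none => rw [hs] at h; simp at h
  | some lines =>
    rw [hs] at h
    simp only [Option.map_some, Option.some.injEq] at h
    exact ⟨lines, rfl, by rw [h, pvSplitOn_char]⟩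

-- ===== VERDICT (by name: the statement is the Claim_ definition above) =====
theorem fetch_more_log_py_spec : Claim_equal_fetch_more_log_py := by
  intro target log _dom
  unfold Spec_fetch_more_log_py
  obtain ⟨lines, hs, hls⟩ := pvSplit_some log
  set T : List Char := PySem.Chars.lower target.toList with hT
  set L : List Char := PySem.Chars.lower log.toList with hLdef
  -- rewrite A's side into a findIdx? over the lowered split of log
  have hA : fetch_more_log_py target log
      = (List.findIdx? (fun l => PySem.Chars.isIn T l) (L.splitOn '\n')).map
          (fun (k : Nat) => PySem.Str.join "\n"
            (PySem.List.slice lines (some (max 0 ((k : Int) - 10)))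
              (some (min ((lines.length : Int)) ((k : Int) + 10))))) := by
    rw [fetch_more_log_py, hs]
    dsimp only
    rw [pvGoA_eq]
    have hpred : (fun l => PySem.Str.isIn (PySem.Str.lower target) (PySem.Str.lower l))
        = (fun cs => PySem.Chars.isIn T (PySem.Chars.lower cs)) ∘ String.toList := by
      funext l
      simp [PySem.Str.isIn_eq, PySem.Str.toList_lower]
      rw [← hT]
    have hmapsplit : (log.toList.splitOn '\n').map (List.map PySem.Chars.lowerChar)
        = L.splitOn '\n' := by
      rw [hLdef, PySem.Chars.lower, pvSplitOn_map PySem.Chars.lowerChar '\n' pvLowerChar_newline]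
    have hidx : List.findIdx? (fun l => PySem.Str.isIn (PySem.Str.lower target) (PySem.Str.lower l)) lines
        = List.findIdx? (fun l => PySem.Chars.isIn T l) (L.splitOn '\n') := by
      rw [hpred, ← List.findIdx?_map, hls, ← hmapsplit]
      rw [List.findIdx?_map]
      rfl
    rw [hidx]
    congr 1
    funext k
    simp
  rw [hA]
  rw [fetch_more_log_py_alt]
  simp only []
  by_cases hnl : PySem.Str.isIn "\n" (PySem.Str.lower target) = true
  · -- the needle contains a newline: both sides are none
    rw [if_pos hnl]
    have hmemT : '\n' ∈ T := by
      rw [PySem.Str.isIn_eq] at hnl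
      have hsep : ("\n" : String).toList = ['\n'] := by decide
      rw [hsep, PySem.Str.toList_lower, PySem.Chars.isIn_iff_infix, pvSingleton_infix] at hnl
      exact hnl
    have hnone : List.findIdx? (fun l => PySem.Chars.isIn T l) (L.splitOn '\n') = none := by
      rw [List.findIdx?_eq_none_iff]
      intro l hl
      simp only [PySem.Chars.isIn_eq_false_iff]
      intro hinf
      exact pvSplitOn_no_sep '\n' L l hl (hinf.mem hmemT)
    rw [hnone]
    rfl
  · rw [if_neg hnl]
    have hnlT : '\n' ∉ T := by
      rw [PySem.Str.isIn_eq] at hnl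
      have hsep : ("\n" : String).toList = ['\n'] := by decide
      rw [hsep, PySem.Str.toList_lower] at hnl
      intro hmem
      exact hnl (by rw [PySem.Chars.isIn_iff_infix, pvSingleton_infix]; exact hmem)
    have hfind : PySem.Str.find (PySem.Str.lower log) (PySem.Str.lower target)
        = PySem.Chars.find L T := by
      rw [PySem.Str.find_eq, PySem.Str.toList_lower, PySem.Str.toList_lower]
    rw [pvCrux T hnlT L]
    by_cases hoff : PySem.Str.find (PySem.Str.lower log) (PySem.Str.lower target) = -1
    · rw [if_pos hoff]
      rw [if_neg (by
        rw [hfind] at hoff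
        exact (PySem.Chars.find_eq_neg_one_iff L T).mp hoff)]
      rfl
    · rw [if_neg hoff]
      have hinf : T <:+: L := by
        rw [hfind] at hoff
        exact (PySem.Chars.find_ne_neg_one_iff L T).mp hoff
      rw [if_pos hinf, hs]
      have hge : 0 ≤ PySem.Chars.find L T := by
        have := PySem.Chars.neg_one_le_find L T
        rw [hfind] at hoff
        omega
      have hcount : (PySem.Str.count (PySem.Str.slice (PySem.Str.lower log) none
            (some (PySem.Str.find (PySem.Str.lower log) (PySem.Str.lower target)))) "\n" : Int)
          = ((L.take (PySem.Chars.find L T).toNat).count '\n' : Int) := by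
        rw [PySem.Str.count_eq]
        have hsep : ("\n" : String).toList = ['\n'] := by decide
        rw [hsep, PySem.Str.toList_slice, PySem.Str.toList_lower]
        rw [PySem.Chars.slice_eq_listSlice, hfind, PySem.List.slice_to _ hge]
        rw [pvCount_singleton]
      simp only [Option.map_some, Option.some.injEq]
      rw [hcount]
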